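-- pv_equiv track=rewrite | github.com/Sk1nnyB/runescape | decrypt_v36373bb.py | cipherTextFun
-- ===== SOURCE A (Python) =====
-- def cipherTextFun(data, algorithm):
-- 	cipherText = ""
-- 	trigger = 0
-- 	for i in range (0, len(data)):
-- 		if trigger == 1:
-- 			cipherText = cipherText+ data[i]
-- 		if data[i] == ":":
-- 			trigger = 1
--
-- 	return(cipherText)
-- ===== SOURCE B (Python) =====
-- def cipherTextFun(data, algorithm):
--     idx = data.find(":")
--     if idx == -1:
--         return ""
--     return data[idx + 1:]
-- ===== Notes on version B (the rewrite author's own statement) =====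
-- stated objective: idiomatic
-- what changed: Replaces the per-character scan with a trigger flag and repeated string concatenation by a single find of the first colon followed by one slice.
import Mathlib
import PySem

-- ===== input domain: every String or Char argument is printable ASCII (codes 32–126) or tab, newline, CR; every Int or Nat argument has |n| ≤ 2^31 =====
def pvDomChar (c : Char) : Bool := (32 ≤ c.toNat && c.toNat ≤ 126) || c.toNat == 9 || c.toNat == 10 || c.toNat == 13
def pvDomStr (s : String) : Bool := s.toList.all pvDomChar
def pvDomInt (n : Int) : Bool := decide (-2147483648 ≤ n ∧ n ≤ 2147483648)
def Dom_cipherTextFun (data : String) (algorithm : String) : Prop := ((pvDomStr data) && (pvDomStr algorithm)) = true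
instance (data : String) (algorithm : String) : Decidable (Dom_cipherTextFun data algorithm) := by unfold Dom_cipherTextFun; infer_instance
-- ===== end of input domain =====

-- B replaces A's per-character scan with a trigger flag by one find of the first colon and one slice (idiomatic).

-- ===== PORT A =====
-- one loop iteration of A: append data[i] if trigger is already 1, then set trigger if data[i] is ':'
def cipherStepA (st : List Char × Nat) (c : Char) : List Char × Nat :=
  let ct := if st.2 = 1 then st.1 ++ [c] else st.1
  let tr := if c = ':' then 1 else st.2
  (ct, tr)

def cipherTextFun (data : String) (algorithm : String) : String :=
  String.ofList (data.toList.foldl cipherStepA ([], 0)).1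

-- ===== PORT B =====
def cipherTextFun_alt (data : String) (algorithm : String) : String :=
  let idx := PySem.Str.find data ":"
  if idx = -1 then "" else PySem.Str.slice data (some (idx + 1)) none

-- ===== PRECONDITION & SPEC =====
def Spec_cipherTextFun (data : String) (algorithm : String) (out : String) : Prop := out = cipherTextFun_alt data algorithm
instance (data : String) (algorithm : String) (out : String) : Decidable (Spec_cipherTextFun data algorithm out) := by unfold Spec_cipherTextFun; infer_instance

-- ===== CLAIM (what is proved, stated in full; the proofs are below) =====
def Claim_equal_cipherTextFun : Prop := ∀ (data : String) (algorithm : String), Dom_cipherTextFun data algorithm → Spec_cipherTextFun data algorithm (cipherTextFun data algorithm)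

-- ===== LEMMAS AND PROOFS =====

-- once the trigger is 1, A appends every remaining character
theorem cipherFold_one (l acc : List Char) :
    l.foldl cipherStepA (acc, 1) = (acc ++ l, 1) := by
  induction l generalizing acc with
  | nil => simp
  | cons c t ih => simp [List.foldl, cipherStepA, ih]

-- before a colon is seen, A appends nothing and the trigger stays 0
theorem cipherFold_zero (l acc : List Char) (h : ':' ∉ l) :
    l.foldl cipherStepA (acc, 0) = (acc, 0) := by
  induction l with
  | nil => simp
  | cons c t ih =>
    simp only [List.mem_cons, not_or] at h
    simp [List.foldl, cipherStepA, Ne.symm h.1, ih h.2]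

-- A on a string whose first colon splits it as p ++ ':' :: s returns s
theorem cipherFold_split (p s : List Char) (hp : ':' ∉ p) :
    (p ++ ':' :: s).foldl cipherStepA ([], 0) = (s, 1) := by
  rw [List.foldl_append, cipherFold_zero p [] hp]
  simp [List.foldl, cipherStepA, cipherFold_one]

-- every list is either colon-free or splits at its first colon
theorem colon_split (l : List Char) :
    ':' ∉ l ∨ ∃ p s, l = p ++ ':' :: s ∧ ':' ∉ p := by
  induction l with
  | nil => exact Or.inl (by simp)
  | cons c t ih =>
    by_cases hc : c = ':'
    · exact Or.inr ⟨[], t, by simp [hc], by simp⟩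
    · cases ih with
      | inl h =>
        refine Or.inl ?_
        simp only [List.mem_cons, not_or]
        exact ⟨fun e => hc e.symm, h⟩
      | inr h =>
        obtain ⟨p, s, rfl, hp⟩ := h
        refine Or.inr ⟨c :: p, s, rfl, ?_⟩
        simp only [List.mem_cons, not_or]
        exact ⟨fun e => hc e.symm, hp⟩

-- find points at the first colon
theorem find_colon_split (p s : List Char) (hp : ':' ∉ p) :
    PySem.Chars.find (p ++ ':' :: s) [':'] = (p.length : Int) := by
  have hinf : [':'] <:+: (p ++ ':' :: s) := ⟨p, s, by simp⟩
  have hnn : 0 ≤ PySem.Chars.find (p ++ ':' :: s) [':'] :=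
    (PySem.Chars.find_nonneg_iff _ _).2 hinf
  obtain ⟨hpre, hmin⟩ := PySem.Chars.find_spec hnn
  set j := (PySem.Chars.find (p ++ ':' :: s) [':']).toNat with hj
  have hle : j ≤ p.length := by
    by_contra hgt
    push_neg at hgt
    exact hmin p.length hgt ⟨s, by simp⟩
  have hge : p.length ≤ j := by
    by_contra hgt
    push_neg at hgt
    obtain ⟨r, hr⟩ := hpre
    have hg : (p ++ ':' :: s)[j]? = some ':' := by
      have h0 := congrArg (fun x => x[0]?) hr
      simp only [List.getElem?_drop, Nat.add_zero] at h0
      simpa using h0.symm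
    rw [List.getElem?_append_left hgt] at hg
    exact hp (List.mem_of_getElem? hg)
  have : j = p.length := le_antisymm hle hge
  omega

-- ===== VERDICT (by name: the statement is the Claim_ definition above) =====
theorem cipherTextFun_spec : Claim_equal_cipherTextFun := by
  intro data algorithm _
  unfold Spec_cipherTextFun cipherTextFun cipherTextFun_alt
  have hcolon : (":" : String).toList = [':'] := by decide
  rcases colon_split data.toList with h | ⟨p, s, hsplit, hp⟩
  · have hfind : PySem.Str.find data ":" = -1 := by
      rw [PySem.Str.find_eq, hcolon, PySem.Chars.find_eq_neg_one_iff]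
      intro hinf
      obtain ⟨u, v, huv⟩ := hinf
      exact h (by rw [← huv]; simp)
    rw [hfind, if_pos rfl, cipherFold_zero _ _ h]
  · have hfind : PySem.Str.find data ":" = (p.length : Int) := by
      rw [PySem.Str.find_eq, hcolon, hsplit, find_colon_split p s hp]
    rw [hfind]
    have hne : (p.length : Int) ≠ -1 := by omega
    rw [if_neg hne]
    apply String.ext
    have hslice : (PySem.Str.slice data (some ((p.length : Int) + 1)) none).toList
        = data.toList.drop (p.length + 1) := by
      simp only [PySem.Str.slice, PySem.Chars.slice_eq_listSlice]
      rw [PySem.List.slice_from data.toList (show (0:Int) ≤ (p.length : Int) + 1 by omega)]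
      simp only [String.toList_ofList]
      have hnat : ((p.length : Int) + 1).toNat = p.length + 1 := by omega
      rw [hnat]
    rw [hslice, hsplit]
    have hdrop : List.drop (p.length + 1) (p ++ ':' :: s) = s := by
      rw [show p ++ ':' :: s = (p ++ [':']) ++ s by simp,
          show p.length + 1 = (p ++ [':']).length by simp]
      exact List.drop_left
    rw [hdrop, cipherFold_split p s hp]
    simp
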